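-- pv_equiv track=rewrite | github.com/eliottcassidy2000/math | 04-computation/gk_structure_89c.py | cluster_type
-- ===== SOURCE A (Python) =====
-- def cluster_type(tiling):
--     """Decompose a tiling into clusters of consecutive dominos.
--     Returns sorted tuple of cluster sizes.
--     """
--     if not tiling:
--         return ()
--     clusters = []
--     current_cluster = 1
--     for i in range(1, len(tiling)):
--         if tiling[i] == tiling[i-1] + 2:  # Adjacent dominos (consecutive positions)
--             current_cluster += 1
--         else:
--             clusters.append(current_cluster)
--             current_cluster = 1
--     clusters.append(current_cluster)
--     return tuple(sorted(clusters, reverse=True))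
-- ===== SOURCE B (Python) =====
-- def cluster_type(tiling):
--     """Decompose a tiling into clusters of consecutive dominos.
--     Returns sorted tuple of cluster sizes.
--     """
--     if not tiling:
--         return ()
--     n = len(tiling)
--     breaks = [i for i in range(1, n) if tiling[i] != tiling[i - 1] + 2]
--     boundaries = [0] + breaks + [n]
--     sizes = [b - a for a, b in zip(boundaries, boundaries[1:])]
--     return tuple(sorted(sizes, reverse=True))
-- ===== Notes on version B (the rewrite author's own statement) =====
-- stated objective: alternative
-- what changed: Replaces the running-counter loop that appends a size at each break with a boundary table: collect the break positions by a filter, append the end sentinels, and obtain cluster sizes as adjacent differences of the boundary list.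
import Mathlib
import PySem

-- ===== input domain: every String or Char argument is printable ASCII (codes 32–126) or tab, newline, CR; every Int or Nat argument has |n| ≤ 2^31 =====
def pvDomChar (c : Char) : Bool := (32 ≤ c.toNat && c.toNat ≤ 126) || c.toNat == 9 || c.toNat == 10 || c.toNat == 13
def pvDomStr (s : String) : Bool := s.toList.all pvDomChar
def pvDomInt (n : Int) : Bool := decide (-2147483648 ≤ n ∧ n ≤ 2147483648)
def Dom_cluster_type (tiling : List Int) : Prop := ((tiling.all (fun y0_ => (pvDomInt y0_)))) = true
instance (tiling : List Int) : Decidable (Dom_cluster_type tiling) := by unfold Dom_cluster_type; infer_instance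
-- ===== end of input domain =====

-- B replaces A's running-counter accumulation with a boundary table (break positions
-- plus end sentinels) whose adjacent differences are the cluster sizes (objective: alternative).

-- ===== PORT A =====
-- indices i in range(1, len) are always in range, so tiling[i] is ported as pyGetD (exact here)
def cluster_type (tiling : List Int) : List Int :=
  if tiling = [] then []
  else
    let st := (PySem.List.pyRange 1 (tiling.length : Int) 1).foldl
      (fun (st : List Int × Int) i =>
        if PySem.List.pyGetD tiling i 0 = PySem.List.pyGetD tiling (i - 1) 0 + 2 then
          (st.1, st.2 + 1)
        else
          (st.1 ++ [st.2], 1)) ([], 1)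
    PySem.List.sorted (st.1 ++ [st.2]) (fun x => x) true

-- ===== PORT B =====
def cluster_type_alt (tiling : List Int) : List Int :=
  if tiling = [] then []
  else
    let n : Int := tiling.length
    let breaks := (PySem.List.pyRange 1 n 1).filter
      (fun i => !(PySem.List.pyGetD tiling i 0 == PySem.List.pyGetD tiling (i - 1) 0 + 2))
    let boundaries := [0] ++ breaks ++ [n]
    let sizes := (boundaries.zip (PySem.List.slice boundaries (some 1) none)).map
      (fun p => p.2 - p.1)
    PySem.List.sorted sizes (fun x => x) true

-- ===== PRECONDITION & SPEC =====
def Spec_cluster_type (tiling : List Int) (out : List Int) : Prop := out = cluster_type_alt tiling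
instance (tiling : List Int) (out : List Int) : Decidable (Spec_cluster_type tiling out) := by unfold Spec_cluster_type; infer_instance

-- ===== CLAIM (what is proved, stated in full; the proofs are below) =====
def Claim_equal_cluster_type : Prop := ∀ (tiling : List Int), Dom_cluster_type tiling → Spec_cluster_type tiling (cluster_type tiling)

-- ===== LEMMAS AND PROOFS =====

-- adjacent differences of a list
def pvDiffs : List Int → List Int
  | a :: b :: rest => (b - a) :: pvDiffs (b :: rest)
  | _ => []

-- last element with default 0
def pvLast (l : List Int) : Int := l.getLast?.getD 0

theorem pvLast_concat (l : List Int) (x : Int) : pvLast (l ++ [x]) = x := by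
  simp [pvLast]

theorem pvDiffs_concat : ∀ (l : List Int), l ≠ [] → ∀ x,
    pvDiffs (l ++ [x]) = pvDiffs l ++ [x - pvLast l]
  | [], h, _ => absurd rfl h
  | [a], _, x => by simp [pvDiffs, pvLast]
  | a :: b :: rest, _, x => by
    have ih := pvDiffs_concat (b :: rest) (by simp) x
    simp only [List.cons_append, pvDiffs]
    rw [show b :: (rest ++ [x]) = (b :: rest) ++ [x] from rfl, ih]
    simp [pvLast]

theorem pvZip_diffs : ∀ (l : List Int),
    (l.zip l.tail).map (fun p => p.2 - p.1) = pvDiffs l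
  | [] => rfl
  | [a] => rfl
  | a :: b :: rest => by
    have ih := pvZip_diffs (b :: rest)
    simp only [List.tail_cons] at ih ⊢
    simp [pvDiffs, List.zip_cons_cons, ← ih]

-- main invariant: A's fold state vs. B's break list, for every k ≥ 1
theorem pvInv (tiling : List Int) : ∀ (k : Nat), 1 ≤ k →
    (PySem.List.pyRange 1 (k : Int) 1).foldl
      (fun (st : List Int × Int) i =>
        if PySem.List.pyGetD tiling i 0 = PySem.List.pyGetD tiling (i - 1) 0 + 2 then
          (st.1, st.2 + 1)
        else
          (st.1 ++ [st.2], 1)) ([], 1)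
    = (pvDiffs (0 :: (PySem.List.pyRange 1 (k : Int) 1).filter
          (fun i => !(PySem.List.pyGetD tiling i 0 == PySem.List.pyGetD tiling (i - 1) 0 + 2))),
       (k : Int) - pvLast (0 :: (PySem.List.pyRange 1 (k : Int) 1).filter
          (fun i => !(PySem.List.pyGetD tiling i 0 == PySem.List.pyGetD tiling (i - 1) 0 + 2)))) := by
  intro k hk
  induction k with
  | zero => omega
  | succ k ih =>
    rcases Nat.lt_or_ge k 1 with hk1 | hk1
    · -- k = 0 : base case, range is empty
      interval_cases k
      simp [PySem.List.pyRange_one_eq_nil, pvDiffs, pvLast]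
    · have ih := ih hk1
      have hcast : ((k + 1 : Nat) : Int) = (k : Int) + 1 := by push_cast; ring
      have hsplit : PySem.List.pyRange 1 ((k : Int) + 1) 1
          = PySem.List.pyRange 1 (k : Int) 1 ++ [(k : Int)] := by
        exact PySem.List.pyRange_one_succ_right (by exact_mod_cast hk1)
      rw [hcast, hsplit, List.foldl_append, ih, List.filter_append,
        List.filter_singleton]
      by_cases h : PySem.List.pyGetD tiling (k : Int) 0
          = PySem.List.pyGetD tiling ((k : Int) - 1) 0 + 2
      · have hb : (!(PySem.List.pyGetD tiling (k : Int) 0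
            == PySem.List.pyGetD tiling ((k : Int) - 1) 0 + 2)) = false := by
          simp only [Bool.not_eq_false', beq_iff_eq]; exact h
        rw [hb]
        simp only [List.foldl_cons, List.foldl_nil, if_pos h,
          cond_false, List.append_nil, Prod.mk.injEq]
        exact ⟨trivial, by ring⟩
      · have hb : (!(PySem.List.pyGetD tiling (k : Int) 0
            == PySem.List.pyGetD tiling ((k : Int) - 1) 0 + 2)) = true := by
          simp only [Bool.not_eq_eq_eq_not, Bool.not_true, beq_eq_false_iff_ne, ne_eq]
          exact h
        rw [hb]
        simp only [List.foldl_cons, List.foldl_nil, if_neg h, cond_true, Prod.mk.injEq]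
        have hne : (0 :: (PySem.List.pyRange 1 (k : Int) 1).filter
            (fun i => !(PySem.List.pyGetD tiling i 0
              == PySem.List.pyGetD tiling (i - 1) 0 + 2))) ≠ [] := by simp
        rw [show (0 :: ((PySem.List.pyRange 1 (k : Int) 1).filter
              (fun i => !(PySem.List.pyGetD tiling i 0
                == PySem.List.pyGetD tiling (i - 1) 0 + 2)) ++ [(k : Int)]))
              = (0 :: (PySem.List.pyRange 1 (k : Int) 1).filter
              (fun i => !(PySem.List.pyGetD tiling i 0
                == PySem.List.pyGetD tiling (i - 1) 0 + 2))) ++ [(k : Int)] from rfl,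
          pvDiffs_concat _ hne, pvLast_concat]
        exact ⟨rfl, by ring⟩

-- ===== VERDICT (by name: the statement is the Claim_ definition above) =====
theorem cluster_type_spec : Claim_equal_cluster_type := by
  intro tiling _
  unfold Spec_cluster_type cluster_type cluster_type_alt
  by_cases hnil : tiling = []
  · simp [hnil]
  · simp only [if_neg hnil]
    have hlen : 1 ≤ tiling.length := by
      cases tiling with
      | nil => exact absurd rfl hnil
      | cons a t => simp
    have hinv := pvInv tiling tiling.length hlen
    rw [hinv]
    congr 1
    rw [PySem.List.slice_from_one, pvZip_diffs]
    rw [show ([(0 : Int)] ++ (PySem.List.pyRange 1 (tiling.length : Int) 1).filter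
        (fun i => !(PySem.List.pyGetD tiling i 0
          == PySem.List.pyGetD tiling (i - 1) 0 + 2)) ++ [(tiling.length : Int)])
        = (0 :: (PySem.List.pyRange 1 (tiling.length : Int) 1).filter
        (fun i => !(PySem.List.pyGetD tiling i 0
          == PySem.List.pyGetD tiling (i - 1) 0 + 2))) ++ [(tiling.length : Int)] from by simp,
      pvDiffs_concat _ (by simp)]
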